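-- pv_equiv track=rewrite | github.com/rjfs/codejam | 2019/qual/foregone.py | solve
-- ===== SOURCE A (Python) =====
-- def four_digit(n):
--     """ Returns digit of 4. Returns 0 if not found """
--     n_str = str(n)
--     for i_n, i in enumerate(map(int, n_str)):
--         if i == 4:
--             return len(n_str) - i_n
--
--     return 0
--
-- def get_new_i(i, d_i):
--     to_add = 5 * 10 ** (d_i - 1)
--     to_subtract = int(str(i)[-d_i:])
--     return i - to_subtract + to_add
--
-- def get_new_j(j, d_j):
--     rem_digits = d_j - 1
--     if rem_digits > 0:
--         to_subtract = int(str(j)[-rem_digits:]) + 1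
--     else:
--         to_subtract = 1
--
--     return j - to_subtract
--
-- def solve(n):
--     i = 1
--     while True:
--         d_i = four_digit(i)
--         if d_i == 0:
--             j = n - i
--             d_j = four_digit(j)
--             if d_j == 0:
--                 break
--             else:
--                 j = get_new_j(j, d_j)
--                 i = n - j
--         else:
--             i = get_new_i(i, d_i)
--
--     return i, j
-- ===== SOURCE B (Python) =====
-- def solve(n):
--     i = 1
--     while True:
--         if '4' not in str(i) and '4' not in str(n - i):
--             return i, n - i
--         i += 1
-- ===== Notes on version B (the rewrite author's own statement) =====
-- stated objective: simpler
-- what changed: A jumps over blocks of 4-containing candidates by string surgery on the offending digit (three helper functions); B is a plain linear search returning the first i>=1 with no '4' in str(i) or str(n-i), which provably finds the same minimal i.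
import Mathlib
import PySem

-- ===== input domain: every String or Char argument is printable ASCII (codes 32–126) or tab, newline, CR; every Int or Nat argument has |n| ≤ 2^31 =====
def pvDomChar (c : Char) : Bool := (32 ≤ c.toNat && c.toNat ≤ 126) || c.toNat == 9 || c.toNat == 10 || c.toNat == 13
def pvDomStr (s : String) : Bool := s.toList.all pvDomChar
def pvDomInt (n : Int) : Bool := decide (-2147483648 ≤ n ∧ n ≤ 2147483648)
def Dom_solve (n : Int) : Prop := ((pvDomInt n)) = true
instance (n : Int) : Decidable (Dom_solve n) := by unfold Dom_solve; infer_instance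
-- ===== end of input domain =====

-- B replaces A's digit-surgery jumps with a plain linear search for the first valid split (same value, simpler code).

-- ===== PORT A =====
-- four_digit: scan str(n) left to right; первый '4' gives len - index, else 0. int(ch) may raise → Option.
def fourDigitGo : List Char → Nat → Nat → Option Int
  | [], _, _ => some 0
  | c :: rest, idx, len =>
    match PySem.Int.ofChars? [c] with          -- int(ch); none = ValueError
    | none => none
    | some v => if v = 4 then some ((len : Int) - (idx : Int)) else fourDigitGo rest (idx + 1) len

def fourDigit (n : Int) : Option Int :=
  let s := PySem.Int.toChars n
  fourDigitGo s 0 s.length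

def getNewI (i di : Int) : Option Int :=
  let toAdd : Int := 5 * 10 ^ (di - 1).toNat   -- 10 ** (d_i - 1); only called with di ≥ 1, where toNat is exact
  match PySem.Int.ofChars? (PySem.List.slice (PySem.Int.toChars i) (some (-di)) none) with
  | none => none
  | some toSub => some (i - toSub + toAdd)

def getNewJ (j dj : Int) : Option Int :=
  let rem := dj - 1
  if rem > 0 then
    match PySem.Int.ofChars? (PySem.List.slice (PySem.Int.toChars j) (some (-rem)) none) with
    | none => none
    | some v => some (j - (v + 1))
  else some (j - 1)

-- while True: fuel is a totality guard only (the proof shows n.toNat + 1 steps always suffice on Pre_)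
def solveGo (n : Int) : Nat → Int → Option (Int × Int)
  | 0, _ => none
  | fuel + 1, i =>
    match fourDigit i with
    | none => none
    | some di =>
      if di = 0 then
        let j := n - i
        match fourDigit j with
        | none => none
        | some dj =>
          if dj = 0 then some (i, j)
          else
            match getNewJ j dj with
            | none => none
            | some j' => solveGo n fuel (n - j')
      else
        match getNewI i di with
        | none => none
        | some i' => solveGo n fuel i'

def solve (n : Int) : Int × Int := (solveGo n (n.toNat + 1) 1).getD (0, 0)

-- ===== PORT B =====
def solveAltGo (n : Int) : Nat → Int → Int × Int
  | 0, i => (i, n - i)                          -- fuel guard only, never reached on Pre_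
  | fuel + 1, i =>
    if !(PySem.Str.isIn "4" (PySem.Int.toStr i)) && !(PySem.Str.isIn "4" (PySem.Int.toStr (n - i))) then
      (i, n - i)
    else solveAltGo n fuel (i + 1)

def solve_alt (n : Int) : Int × Int := solveAltGo n (n.natAbs * 4 + 10) 1

-- ===== PRECONDITION & SPEC =====
-- A raises ValueError for every n ≤ 0 (j = n - i goes negative and int('-') fails), so Pre_ is exactly n ≥ 1.
def Pre_solve (n : Int) : Prop := 1 ≤ n
instance (n : Int) : Decidable (Pre_solve n) := by unfold Pre_solve; infer_instance

def pvWitness_solve : Int := 5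

def Spec_solve (n : Int) (out : Int × Int) : Prop := out = solve_alt n
instance (n : Int) (out : Int × Int) : Decidable (Spec_solve n out) := by unfold Spec_solve; infer_instance

-- ===== CLAIM (what is proved, stated in full; the proofs are below) =====
def Claim_equal_solve : Prop := ∀ (n : Int), Dom_solve n → Pre_solve n → Spec_solve n (solve n)

-- ===== LEMMAS AND PROOFS =====

-- `has4 m` : decimal representation of m contains digit 4
abbrev has4 (m : Nat) : Prop := 4 ∈ Nat.digits 10 m
-- a valid split of N whose first component is i
abbrev goodPair (N i : Nat) : Prop := 1 ≤ i ∧ i ≤ N ∧ ¬ has4 i ∧ ¬ has4 (N - i)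

-- ---- decimal-string structure ----
lemma toDigitsCore_eq : ∀ (f n : Nat) (ds : List Char), 0 < n → n < 10 ^ f →
    Nat.toDigitsCore 10 f n ds = ((Nat.digits 10 n).reverse.map Nat.digitChar) ++ ds := by
  intro f
  induction f with
  | zero => intro n ds h1 h2; norm_num at h2; omega
  | succ f ih =>
    intro n ds h1 h2
    rw [Nat.toDigitsCore]
    by_cases h : n / 10 = 0
    · have hlt : n < 10 := by omega
      simp only [h]
      rw [Nat.digits_def' (by norm_num : (1:ℕ) < 10) h1, h, Nat.digits_zero]
      simp [Nat.mod_eq_of_lt hlt]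
    · rw [ih (n / 10) _ (Nat.pos_of_ne_zero h) (by
        have h3 : n < 10 * 10 ^ f := by rw [← pow_succ']; exact h2
        exact Nat.div_lt_of_lt_mul h3)]
      rw [Nat.digits_def' (by norm_num : (1:ℕ) < 10) h1]
      simp [h]

lemma toChars_pos (m : Nat) (hm : 1 ≤ m) :
    PySem.Int.toChars (m : Int) = (Nat.digits 10 m).reverse.map Nat.digitChar := by
  have h1 : ¬ ((m : Int) < 0) := by omega
  rw [PySem.Int.toChars, if_neg h1]
  have h2 : (m : Int).toNat = m := by omega
  rw [h2, Nat.toDigits]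
  rw [toDigitsCore_eq (m + 1) m [] hm (lt_of_lt_of_le (Nat.lt_pow_self (by norm_num)) (Nat.pow_le_pow_right (by norm_num) (by omega)))]
  simp

lemma digit_char_facts (d : Nat) (h : d < 10) :
    Nat.digitChar d ≠ '-' ∧ Nat.digitChar d ≠ '+' ∧ (Nat.digitChar d).isDigit = true ∧
    PySem.Int.isIntSpace (Nat.digitChar d) = false ∧ (Nat.digitChar d).toNat - '0'.toNat = d ∧
    (Nat.digitChar d = '4' ↔ d = 4) := by
  interval_cases d <;> exact ⟨by decide, by decide, by decide, by decide, by decide, by decide⟩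

lemma dropWhile_eq_self_of_all {l : List Char} (h : ∀ c ∈ l, PySem.Int.isIntSpace c = false) :
    l.dropWhile PySem.Int.isIntSpace = l := by
  cases l with
  | nil => rfl
  | cons c t => rw [List.dropWhile_cons, h c (by simp)]; rfl

-- ---- the parser on pure digit strings (captures PySem's private parse loop via an existential + rfl) ----
lemma ofChars_digits (D : List Nat) (hne : D ≠ []) (hlt : ∀ d ∈ D, d < 10) :
    PySem.Int.ofChars? (D.map Nat.digitChar) = some ((D.foldl (fun a d => a * 10 + d) 0 : Nat) : Int) := by
  obtain ⟨g, hof, h0, h1⟩ :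
      ∃ g : List Char → Bool → Nat → Option Nat,
        (∀ s : List Char, PySem.Int.ofChars? s =
          (match (List.dropWhile PySem.Int.isIntSpace (List.dropWhile PySem.Int.isIntSpace s).reverse).reverse with
           | '-' :: ds => Option.map (fun n => -n) (do let a ← (match ds with | [] => none | cs' => g cs' false 0); pure ((a : Nat) : Int))
           | '+' :: ds => Option.map (fun n => n) (do let a ← (match ds with | [] => none | cs' => g cs' false 0); pure ((a : Nat) : Int))
           | ds => Option.map (fun n => n) (do let a ← (match ds with | [] => none | cs' => g cs' false 0); pure ((a : Nat) : Int)))) ∧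
        (∀ b acc, g [] b acc = if b = true then some acc else none) ∧
        (∀ c rest b acc, g (c :: rest) b acc =
          if c.isDigit = true then g rest true (acc * 10 + (c.toNat - '0'.toNat))
          else if c = '_' ∧ b = true then
            (match rest with
             | d :: _ => if d.isDigit = true then g rest false acc else none
             | [] => none)
          else none) :=
    ⟨_, fun _ => rfl, fun _ _ => rfl, fun _ _ _ _ => rfl⟩
  have gAll : ∀ (E : List Nat) (acc : Nat), (∀ d ∈ E, d < 10) →
      g (E.map Nat.digitChar) true acc = some (E.foldl (fun a d => a * 10 + d) acc) := by
    intro E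
    induction E with
    | nil => intro acc _; rw [List.map_nil, h0]; rfl
    | cons e t ih =>
      intro acc hE
      obtain ⟨_, _, hdig, _, hval, _⟩ := digit_char_facts e (hE e (by simp))
      rw [List.map_cons, h1, if_pos hdig, hval, ih (acc * 10 + e) (fun d hd => hE d (by simp [hd]))]
      rfl
  have hspace : ∀ c ∈ D.map Nat.digitChar, PySem.Int.isIntSpace c = false := by
    intro c hc
    obtain ⟨d, hd, rfl⟩ := List.mem_map.1 hc
    exact (digit_char_facts d (hlt d hd)).2.2.2.1
  rw [hof]
  rw [dropWhile_eq_self_of_all hspace,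
      dropWhile_eq_self_of_all (fun c hc => hspace c (List.mem_reverse.1 hc)), List.reverse_reverse]
  obtain ⟨d, rest, rfl⟩ : ∃ d rest, D = d :: rest := by
    cases D with
    | nil => exact absurd rfl hne
    | cons d rest => exact ⟨d, rest, rfl⟩
  obtain ⟨hnm, hnp, hdig, _, hval, _⟩ := digit_char_facts d (hlt d (by simp))
  rw [List.map_cons]
  split
  · rename_i ds heq
    rw [List.cons.injEq] at heq
    exact absurd heq.1 hnm
  · rename_i ds heq
    rw [List.cons.injEq] at heq
    exact absurd heq.1 hnp
  · rename_i ds heq h2 h3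
    rw [show (match d.digitChar :: List.map Nat.digitChar rest with
            | [] => (none : Option Nat) | cs' => g cs' false 0) =
          g (d.digitChar :: List.map Nat.digitChar rest) false 0 from rfl]
    rw [h1, if_pos hdig, hval, gAll rest (0 * 10 + d) (fun x hx => hlt x (by simp [hx]))]
    simp

lemma foldl_rev_val (L : List Nat) : ∀ acc : Nat,
    (L.reverse).foldl (fun a d => a * 10 + d) acc = acc * 10 ^ L.length + (Nat.ofDigits 10 L : Nat) := by
  induction L with
  | nil => intro acc; simp
  | cons x t ih =>
    intro acc
    rw [List.reverse_cons, List.foldl_append, ih acc]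
    simp only [List.foldl_cons, List.foldl_nil, Nat.ofDigits_cons, List.length_cons]
    ring

lemma ofDigits_take (m k : Nat) : (Nat.ofDigits 10 ((Nat.digits 10 m).take k) : Nat) = m % 10 ^ k := by
  by_cases hk : (Nat.digits 10 m).length ≤ k
  · rw [List.take_of_length_le hk, Nat.ofDigits_digits]
    have hlt : m < 10 ^ k := lt_of_lt_of_le (Nat.lt_base_pow_length_digits (by norm_num)) (Nat.pow_le_pow_right (by norm_num) hk)
    exact (Nat.mod_eq_of_lt hlt).symm
  · rw [not_le] at hk
    have hsplit : (Nat.digits 10 m).take k ++ (Nat.digits 10 m).drop k = Nat.digits 10 m := List.take_append_drop _ _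
    have hm : m = Nat.ofDigits 10 ((Nat.digits 10 m).take k ++ (Nat.digits 10 m).drop k) := by
      rw [hsplit, Nat.ofDigits_digits]
    rw [Nat.ofDigits_append] at hm
    have hlen : ((Nat.digits 10 m).take k).length = k := List.length_take_of_le (by omega)
    have hlt : (Nat.ofDigits 10 ((Nat.digits 10 m).take k) : Nat) < 10 ^ k := by
      have := Nat.ofDigits_lt_base_pow_length (b := 10) (l := (Nat.digits 10 m).take k) (by norm_num)
        (fun x hx => Nat.digits_lt_base (by norm_num) (List.mem_of_mem_take hx))
      rwa [hlen] at this
    rw [hlen] at hm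
    conv_rhs => rw [hm]
    rw [Nat.add_mul_mod_self_left, Nat.mod_eq_of_lt hlt]

lemma parse_slice (m k : Nat) (hm : 1 ≤ m) (hk : 1 ≤ k) :
    PySem.Int.ofChars? (PySem.List.slice (PySem.Int.toChars (m : Int)) (some (-(k : Int))) none) =
      some ((m % 10 ^ k : Nat) : Int) := by
  rw [toChars_pos m hm, PySem.List.slice_from_neg_natCast _ k (by omega)]
  rw [List.length_map, ← List.map_drop, List.length_reverse]
  have hdrop : (Nat.digits 10 m).reverse.drop ((Nat.digits 10 m).length - k) =
      ((Nat.digits 10 m).take k).reverse := by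
    rw [← List.reverse_take]
  rw [hdrop]
  have hLne : Nat.digits 10 m ≠ [] := Nat.digits_ne_nil_iff_ne_zero.2 (by omega)
  have hne : ((Nat.digits 10 m).take k).reverse ≠ [] := by
    simp only [ne_eq, List.reverse_eq_nil_iff, List.take_eq_nil_iff, not_or]
    exact ⟨by omega, hLne⟩
  have hlt : ∀ d ∈ ((Nat.digits 10 m).take k).reverse, d < 10 := fun d hd =>
    Nat.digits_lt_base (by norm_num) (List.mem_of_mem_take (List.mem_reverse.1 hd))
  rw [ofChars_digits _ hne hlt, foldl_rev_val, ofDigits_take]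
  simp

lemma digits_getElem (m : Nat) : ∀ (i : Nat) (h : i < (Nat.digits 10 m).length),
    (Nat.digits 10 m)[i] = m / 10 ^ i % 10 := by
  induction m using Nat.strong_induction_on with
  | _ m ih =>
    intro i h
    have hm : 0 < m := by
      by_contra hc
      have : m = 0 := by omega
      subst this; simp at h
    have hd := Nat.digits_def' (by norm_num : (1:ℕ) < 10) hm
    rw [List.getElem_of_eq hd]
    cases i with
    | zero => simp
    | succ i =>
      simp only [List.getElem_cons_succ]
      have h' : i < (Nat.digits 10 (m / 10)).length := by
        have h2 := h
        rw [hd] at h2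
        simpa using h2
      rw [ih (m / 10) (by omega) i h']
      rw [Nat.div_div_eq_div_mul, ← pow_succ']

lemma has4_iff (m : Nat) : has4 m ↔ ∃ k, m / 10 ^ k % 10 = 4 := by
  constructor
  · intro h
    obtain ⟨i, hi, he⟩ := List.getElem_of_mem h
    exact ⟨i, by rw [← digits_getElem m i hi, he]⟩
  · rintro ⟨k, hk⟩
    have hge : 10 ^ k ≤ m := by
      by_contra hc
      rw [Nat.div_eq_of_lt (by omega)] at hk
      simp at hk
    have hlen : k < (Nat.digits 10 m).length := by
      by_contra hc
      have hlt : m < 10 ^ (Nat.digits 10 m).length := Nat.lt_base_pow_length_digits (by norm_num)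
      have : (10:ℕ) ^ (Nat.digits 10 m).length ≤ 10 ^ k := Nat.pow_le_pow_right (by norm_num) (by omega)
      omega
    have h2 := digits_getElem m k hlen
    rw [hk] at h2
    have hmem := List.getElem_mem hlen
    rw [h2] at hmem
    exact hmem

-- ---- four_digit ----
lemma fourDigitGo_spec (E : List Nat) : ∀ (idx len : Nat), (∀ d ∈ E, d < 10) →
    fourDigitGo (E.map Nat.digitChar) idx len =
      (if 4 ∈ E then some ((len : Int) - ((idx + E.idxOf 4 : Nat) : Int)) else some 0) := by
  induction E with
  | nil => intro idx len _; simp [fourDigitGo]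
  | cons e t ih =>
    intro idx len hE
    have he10 : e < 10 := hE e (by simp)
    have hparse : PySem.Int.ofChars? [Nat.digitChar e] = some ((e : Nat) : Int) := by
      have := ofChars_digits [e] (by simp) (by simpa using he10)
      simpa using this
    rw [List.map_cons]
    rw [show fourDigitGo (Nat.digitChar e :: t.map Nat.digitChar) idx len =
        (match PySem.Int.ofChars? [Nat.digitChar e] with
         | none => none
         | some v => if v = 4 then some ((len : Int) - (idx : Int))
                     else fourDigitGo (t.map Nat.digitChar) (idx + 1) len) from rfl]
    rw [hparse]
    rw [show (match some ((e : Nat) : Int) with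
         | none => (none : Option (Int × Int)).map Prod.fst
         | some v => if v = 4 then some ((len : Int) - (idx : Int))
                     else fourDigitGo (t.map Nat.digitChar) (idx + 1) len) =
        (if ((e : Nat) : Int) = 4 then some ((len : Int) - (idx : Int))
         else fourDigitGo (t.map Nat.digitChar) (idx + 1) len) from rfl]
    by_cases he4 : e = 4
    · subst he4
      rw [if_pos (by norm_num)]
      norm_num [List.idxOf_cons]
    · have hv : ¬ ((e : Int) = 4) := by exact_mod_cast he4
      rw [if_neg hv, ih (idx + 1) len (fun d hd => hE d (by simp [hd]))]
      by_cases hmem : 4 ∈ t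
      · rw [if_pos hmem, if_pos (by simp [hmem])]
        rw [List.idxOf_cons_ne _ (by omega)]
        congr 1
        push_cast
        ring
      · rw [if_neg hmem, if_neg (by simp [hmem]; omega)]

lemma fourDigit_spec (m : Nat) :
    ∃ d : Nat, fourDigit (m : Int) = some (d : Int) ∧ (d = 0 ↔ ¬ has4 m) ∧
      (0 < d → m / 10 ^ (d - 1) % 10 = 4) := by
  by_cases hm : m = 0
  · subst hm
    exact ⟨0, by decide, by simp [has4], by omega⟩
  · have hm1 : 1 ≤ m := by omega
    have hlt : ∀ d ∈ (Nat.digits 10 m).reverse, d < 10 := fun d hd =>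
      Nat.digits_lt_base (by norm_num) (List.mem_reverse.1 hd)
    have hfd : fourDigit (m : Int) = fourDigitGo ((Nat.digits 10 m).reverse.map Nat.digitChar) 0
        ((Nat.digits 10 m).reverse.map Nat.digitChar).length := by
      rw [fourDigit, toChars_pos m hm1]
    rw [fourDigitGo_spec _ 0 _ hlt] at hfd
    by_cases h4 : 4 ∈ (Nat.digits 10 m).reverse
    · set R := (Nat.digits 10 m).reverse with hR
      set t := R.idxOf 4 with ht
      have htlt : t < R.length := List.idxOf_lt_length_of_mem h4
      have hlen : (R.map Nat.digitChar).length = R.length := List.length_map _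
      refine ⟨R.length - t, ?_, ?_, ?_⟩
      · rw [hfd, if_pos h4, hlen]
        congr 1
        push_cast [Nat.cast_sub (le_of_lt htlt)]
        ring
      · constructor
        · intro h0; omega
        · intro hn
          exact absurd (List.mem_reverse.1 h4) hn
      · intro _
        have hR4 : R[t] = 4 := List.getElem_idxOf htlt
        have hlen2 : R.length = (Nat.digits 10 m).length := by rw [hR, List.length_reverse]
        have hrev : R[t] = (Nat.digits 10 m)[(Nat.digits 10 m).length - 1 - t]'(by omega) := by
          simp only [hR]
          rw [List.getElem_reverse]
        have := digits_getElem m ((Nat.digits 10 m).length - 1 - t) (by omega)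
        rw [← hrev, hR4] at this
        rw [show R.length - t - 1 = (Nat.digits 10 m).length - 1 - t by omega]
        exact this.symm
    · refine ⟨0, ?_, ?_, by omega⟩
      · rw [hfd, if_neg h4]; rfl
      · simp only [true_iff]
        intro hmem
        exact h4 (List.mem_reverse.2 hmem)

-- ---- the two jump helpers ----
lemma getNewI_eq (i d : Nat) (hi : 1 ≤ i) (hd : 1 ≤ d) :
    getNewI (i : Int) (d : Int) = some ((i - i % 10 ^ d + 5 * 10 ^ (d - 1) : Nat) : Int) := by
  rw [getNewI]
  rw [show (-(d : Int)) = -((d : Nat) : Int) from rfl]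
  rw [parse_slice i d hi hd]
  have ht : ((d : Int) - 1).toNat = d - 1 := by omega
  rw [ht]
  show some ((i : Int) - ((i % 10 ^ d : Nat) : Int) + 5 * 10 ^ (d - 1)) =
    some (((i - i % 10 ^ d + 5 * 10 ^ (d - 1) : Nat) : Int))
  congr 1
  have hmle : i % 10 ^ d ≤ i := Nat.mod_le _ _
  push_cast [Nat.cast_sub hmle]
  ring

lemma getNewJ_eq (j d : Nat) (hj : 1 ≤ j) (hd : 1 ≤ d) :
    getNewJ (j : Int) (d : Int) = some (((j - j % 10 ^ (d - 1) : Nat) : Int) - 1) := by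
  rw [getNewJ]
  by_cases h1 : d = 1
  · subst h1
    rw [if_neg (by norm_num)]
    simp [Nat.mod_one]
  · have hd2 : 2 ≤ d := by omega
    have hrem : ((d : Int) - 1) = ((d - 1 : Nat) : Int) := by omega
    rw [if_pos (by omega : (d : Int) - 1 > 0)]
    rw [hrem, parse_slice j (d - 1) hj (by omega)]
    have hmle : j % 10 ^ (d - 1) ≤ j := Nat.mod_le _ _
    show some ((j : Int) - (((j % 10 ^ (d - 1) : Nat) : Int) + 1)) =
      some ((((j - j % 10 ^ (d - 1) : Nat) : Int)) - 1)
    congr 1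
    push_cast [Nat.cast_sub hmle]
    ring

-- ---- block-of-bad-candidates arithmetic ----
lemma jump_i_progress (i K : Nat) (h4 : i / 10 ^ K % 10 = 4) :
    i < i - i % 10 ^ (K + 1) + 5 * 10 ^ K := by
  have hQ : 0 < 10 ^ K := Nat.pow_pos (by norm_num)
  have hsplit : i % (10 ^ K * 10) = i % 10 ^ K + 10 ^ K * (i / 10 ^ K % 10) := Nat.mod_mul
  rw [h4] at hsplit
  have hpow : (10 : Nat) ^ (K + 1) = 10 ^ K * 10 := pow_succ _ _
  have hlt : i % 10 ^ K < 10 ^ K := Nat.mod_lt _ hQ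
  have hle : i % (10 ^ K * 10) ≤ i := Nat.mod_le _ _
  rw [hpow]
  omega

lemma jump_i_bad (i m K : Nat) (h4 : i / 10 ^ K % 10 = 4) (h1 : i ≤ m)
    (h2 : m < i - i % 10 ^ (K + 1) + 5 * 10 ^ K) : m / 10 ^ K % 10 = 4 := by
  have hQ : 0 < 10 ^ K := Nat.pow_pos (by norm_num)
  have hpow : (10 : Nat) ^ (K + 1) = 10 ^ K * 10 := pow_succ _ _
  have hsplit : i % (10 ^ K * 10) = i % 10 ^ K + 10 ^ K * (i / 10 ^ K % 10) := Nat.mod_mul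
  rw [h4] at hsplit
  have hlt : i % 10 ^ K < 10 ^ K := Nat.mod_lt _ hQ
  rw [hpow] at h2
  have hdm : i = 10 ^ K * 10 * (i / (10 ^ K * 10)) + i % (10 ^ K * 10) :=
    (Nat.div_add_mod _ _).symm
  set q := i / (10 ^ K * 10) with hq
  have hlo : (10 * q + 4) * 10 ^ K ≤ m := by
    have hexp : (10 * q + 4) * 10 ^ K = 10 ^ K * 10 * q + 10 ^ K * 4 := by ring
    omega
  have hhi : m < (10 * q + 4 + 1) * 10 ^ K := by
    have hexp : (10 * q + 4 + 1) * 10 ^ K = 10 ^ K * 10 * q + 5 * 10 ^ K := by ring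
    omega
  rw [Nat.div_eq_of_lt_le hlo hhi]
  omega

lemma jump_j_bad (j m K : Nat) (h4 : j / 10 ^ K % 10 = 4) (h1 : j - j % 10 ^ K ≤ m) (h2 : m ≤ j) :
    m / 10 ^ K % 10 = 4 := by
  have hQ : 0 < 10 ^ K := Nat.pow_pos (by norm_num)
  have hdm : j = 10 ^ K * (j / 10 ^ K) + j % 10 ^ K := (Nat.div_add_mod _ _).symm
  have hlt : j % 10 ^ K < 10 ^ K := Nat.mod_lt _ hQ
  set q := j / 10 ^ K with hq
  have hlo : q * 10 ^ K ≤ m := by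
    have : q * 10 ^ K = 10 ^ K * q := by ring
    omega
  have hhi : m < (q + 1) * 10 ^ K := by
    have : (q + 1) * 10 ^ K = 10 ^ K * q + 10 ^ K := by ring
    omega
  rw [Nat.div_eq_of_lt_le hlo hhi]
  exact h4

-- ---- existence of a valid split ----
lemma dig_ofDigits_le_one : ∀ (L : List Nat) (k : Nat), (∀ d ∈ L, d ≤ 1) →
    (Nat.ofDigits 10 L : Nat) / 10 ^ k % 10 ≤ 1 := by
  intro L
  induction L with
  | nil => intro k _; simp
  | cons e t ih =>
    intro k hL
    have he : e ≤ 1 := hL e (by simp)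
    rw [Nat.ofDigits_cons]
    cases k with
    | zero =>
      simp only [pow_zero, Nat.div_one]
      rw [Nat.add_mul_mod_self_left]
      omega
    | succ k =>
      have hstep : ((e : Nat) + 10 * (Nat.ofDigits 10 t : Nat)) / 10 ^ (k + 1) =
          (Nat.ofDigits 10 t : Nat) / 10 ^ k := by
        rw [pow_succ', ← Nat.div_div_eq_div_mul]
        congr 1
        rw [Nat.add_mul_div_left _ _ (by norm_num : (0:Nat) < 10)]
        omega
      rw [hstep]
      exact ih k (fun d hd => hL d (by simp [hd]))

lemma ofDigits_map_split : ∀ (M : List Nat),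
    (Nat.ofDigits 10 (M.map (fun d => if d = 4 then 3 else d)) : Nat) +
      (Nat.ofDigits 10 (M.map (fun d => if d = 4 then 1 else 0)) : Nat) = Nat.ofDigits 10 M := by
  intro M
  induction M with
  | nil => simp
  | cons e t ih =>
    simp only [List.map_cons, Nat.ofDigits_cons]
    by_cases he : e = 4 <;> simp only [he, if_pos, if_neg, reduceIte] <;> omega

lemma exists_goodPair (N : Nat) (hN : 1 ≤ N) : ∃ i, goodPair N i := by
  have hLne : Nat.digits 10 N ≠ [] := Nat.digits_ne_nil_iff_ne_zero.2 (by omega)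
  have hlt : ∀ d ∈ Nat.digits 10 N, d < 10 := fun d hd => Nat.digits_lt_base (by norm_num) hd
  set L := Nat.digits 10 N with hL
  have hsum : (Nat.ofDigits 10 (L.map (fun d => if d = 4 then 3 else d)) : Nat) +
      (Nat.ofDigits 10 (L.map (fun d => if d = 4 then 1 else 0)) : Nat) = N := by
    rw [ofDigits_map_split, hL, Nat.ofDigits_digits]
  set A := (Nat.ofDigits 10 (L.map (fun d => if d = 4 then 3 else d)) : Nat) with hA
  set B := (Nat.ofDigits 10 (L.map (fun d => if d = 4 then 1 else 0)) : Nat) with hB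
  have hdigA : Nat.digits 10 A = L.map (fun d => if d = 4 then 3 else d) := by
    refine Nat.digits_ofDigits 10 (by norm_num) _ ?_ ?_
    · intro l hl
      obtain ⟨d, hd, rfl⟩ := List.mem_map.1 hl
      have := hlt d hd
      by_cases he : d = 4 <;> simp [he] <;> omega
    · intro h
      rw [List.getLast_map]
      have hlast := Nat.getLast_digit_ne_zero 10 (m := N) (by omega)
      by_cases he : L.getLast (by simpa using h) = 4 <;> simp only [he, reduceIte]
      · norm_num
      · exact hlast
  have hA4 : ¬ has4 A := by
    intro hmem
    rw [has4, hdigA] at hmem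
    obtain ⟨d, _, hd4⟩ := List.mem_map.1 hmem
    by_cases he : d = 4 <;> simp [he] at hd4
  have hApos : 1 ≤ A := by
    rcases Nat.eq_zero_or_pos A with h0 | h1
    · exfalso
      have hdig0 : Nat.digits 10 A = [] := by rw [h0]; simp
      rw [hdigA] at hdig0
      exact hLne (List.map_eq_nil_iff.1 hdig0)
    · omega
  have hB4 : ¬ has4 B := by
    rw [has4_iff]
    rintro ⟨k, hk⟩
    have hle := dig_ofDigits_le_one (L.map (fun d => if d = 4 then 1 else 0)) k ?_
    · rw [← hB] at hle
      omega
    · intro d hd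
      obtain ⟨x, _, rfl⟩ := List.mem_map.1 hd
      by_cases he : x = 4 <;> simp [he]
  refine ⟨A, hApos, by omega, hA4, ?_⟩
  have hNA : N - A = B := by omega
  rw [hNA]
  exact hB4

-- ---- B-side test ----
lemma mem4_toChars (m : Nat) : '4' ∈ PySem.Int.toChars (m : Int) ↔ has4 m := by
  by_cases hm : m = 0
  · subst hm
    constructor
    · intro h
      exact absurd h (by decide)
    · intro h
      simp [has4] at h
  · rw [toChars_pos m (by omega)]
    constructor
    · intro h
      obtain ⟨d, hd, hd4⟩ := List.mem_map.1 h
      have hd10 : d < 10 := Nat.digits_lt_base (by norm_num) (List.mem_reverse.1 hd)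
      have h4 := (digit_char_facts d hd10).2.2.2.2.2.1 hd4
      have := List.mem_reverse.1 hd
      rw [h4] at this
      exact this
    · intro h
      refine List.mem_map.2 ⟨4, List.mem_reverse.2 h, by decide⟩

lemma isIn_toStr (m : Nat) : PySem.Str.isIn "4" (PySem.Int.toStr (m : Int)) = false ↔ ¬ has4 m := by
  rw [← mem4_toChars m]
  constructor
  · intro hf hmem
    have : PySem.Str.isIn "4" (PySem.Int.toStr (m : Int)) = true := by
      rw [PySem.Str.isIn_iff_infix]
      rw [PySem.Int.toList_toStr]
      exact (List.singleton_infix_iff _ _).2 hmem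
    rw [hf] at this
    exact absurd this (by simp)
  · intro hmem
    by_contra hne
    have ht : PySem.Str.isIn "4" (PySem.Int.toStr (m : Int)) = true := by
      cases h : PySem.Str.isIn "4" (PySem.Int.toStr (m : Int))
      · exact absurd h hne
      · rfl
    rw [PySem.Str.isIn_iff_infix, PySem.Int.toList_toStr] at ht
    exact hmem ((List.singleton_infix_iff _ _).1 (by simpa using ht))

-- ---- the two loops ----
lemma not_has4_zero : ¬ has4 0 := by simp [has4]

lemma solveAltGo_run (N s : Nat) (hs : goodPair N s) (hmin : ∀ m, m < s → ¬ goodPair N m) :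
    ∀ (fuel i : Nat), 1 ≤ i → i ≤ s → s - i < fuel →
      solveAltGo (N : Int) fuel (i : Int) = ((s : Int), (N : Int) - (s : Int)) := by
  intro fuel
  induction fuel with
  | zero => intro i _ _ h3; omega
  | succ f ih =>
    intro i h1 h2 h3
    have hiN : i ≤ N := le_trans h2 hs.2.1
    have hjcast : (N : Int) - (i : Int) = ((N - i : Nat) : Int) := by omega
    rcases eq_or_lt_of_le h2 with rfl | hlt
    · have c1 : PySem.Str.isIn "4" (PySem.Int.toStr (i : Int)) = false := (isIn_toStr i).2 hs.2.2.1
      have c2 : PySem.Str.isIn "4" (PySem.Int.toStr ((N - i : Nat) : Int)) = false :=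
        (isIn_toStr (N - i)).2 hs.2.2.2
      rw [show solveAltGo (N : Int) (f + 1) (i : Int) =
          (if (!(PySem.Str.isIn "4" (PySem.Int.toStr (i : Int))) &&
              !(PySem.Str.isIn "4" (PySem.Int.toStr ((N : Int) - (i : Int))))) = true then
            ((i : Int), (N : Int) - (i : Int))
          else solveAltGo (N : Int) f ((i : Int) + 1)) from rfl]
      rw [hjcast]
      rw [if_pos (by rw [c1, c2]; rfl)]
    · have hbad : has4 i ∨ has4 (N - i) := by
        have := hmin i hlt
        simp only [goodPair, not_and_or] at this
        rcases this with h | h | h | h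
        · omega
        · omega
        · exact Or.inl (not_not.1 h)
        · exact Or.inr (not_not.1 h)
      have hcond : (!(PySem.Str.isIn "4" (PySem.Int.toStr (i : Int))) &&
          !(PySem.Str.isIn "4" (PySem.Int.toStr ((N - i : Nat) : Int)))) = false := by
        rcases hbad with h | h
        · have ht : PySem.Str.isIn "4" (PySem.Int.toStr (i : Int)) = true := by
            by_contra hc
            exact ((isIn_toStr i).1 (by simpa using hc)) h
          rw [ht]
          rfl
        · have ht : PySem.Str.isIn "4" (PySem.Int.toStr ((N - i : Nat) : Int)) = true := by
            by_contra hc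
            exact ((isIn_toStr (N - i)).1 (by simpa using hc)) h
          rw [ht]
          simp
      rw [show solveAltGo (N : Int) (f + 1) (i : Int) =
          (if (!(PySem.Str.isIn "4" (PySem.Int.toStr (i : Int))) &&
              !(PySem.Str.isIn "4" (PySem.Int.toStr ((N : Int) - (i : Int))))) = true then
            ((i : Int), (N : Int) - (i : Int))
          else solveAltGo (N : Int) f ((i : Int) + 1)) from rfl]
      rw [hjcast, hcond]
      simp only [Bool.false_eq_true, if_false]
      rw [show ((i : Int) + 1) = ((i + 1 : Nat) : Int) by push_cast; ring]
      exact ih (i + 1) (by omega) (by omega) (by omega)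

lemma solveGo_run (N s : Nat) (hs : goodPair N s) (hmin : ∀ m, m < s → ¬ goodPair N m) :
    ∀ (fuel i : Nat), 1 ≤ i → i ≤ s → s - i < fuel →
      solveGo (N : Int) fuel (i : Int) = some ((s : Int), (N : Int) - (s : Int)) := by
  intro fuel
  induction fuel with
  | zero => intro i _ _ h3; omega
  | succ f ih =>
    intro i h1 h2 h3
    have hiN : i ≤ N := le_trans h2 hs.2.1
    have hjcast : (N : Int) - (i : Int) = ((N - i : Nat) : Int) := by omega
    obtain ⟨di, hdi, hdi0, hdig⟩ := fourDigit_spec i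
    obtain ⟨dj, hdj, hdj0, hdjdig⟩ := fourDigit_spec (N - i)
    rw [show solveGo (N : Int) (f + 1) (i : Int) =
        (match fourDigit (i : Int) with
         | none => none
         | some di =>
           if di = 0 then
             match fourDigit ((N : Int) - (i : Int)) with
             | none => none
             | some dj =>
               if dj = 0 then some ((i : Int), (N : Int) - (i : Int))
               else
                 match getNewJ ((N : Int) - (i : Int)) dj with
                 | none => none
                 | some j' => solveGo (N : Int) f ((N : Int) - j')
           else
             match getNewI (i : Int) di with
             | none => none
             | some i' => solveGo (N : Int) f i') from rfl]
    rw [hdi]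
    simp only []
    by_cases hdiz : di = 0
    · subst hdiz
      rw [if_pos (by norm_num)]
      have hgi : ¬ has4 i := hdi0.1 rfl
      rw [hjcast, hdj]
      simp only []
      by_cases hdjz : dj = 0
      · subst hdjz
        rw [if_pos (by norm_num)]
        have hgj : ¬ has4 (N - i) := hdj0.1 rfl
        have : i = s := by
          by_contra hne
          exact hmin i (by omega) ⟨h1, hiN, hgi, hgj⟩
        subst this
        rw [hjcast]
      · rw [if_neg (by exact_mod_cast hdjz)]
        have hj4 : has4 (N - i) := by
          by_contra hc
          exact hdjz (hdj0.2 hc)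
        have hjpos : 1 ≤ N - i := by
          rcases Nat.eq_zero_or_pos (N - i) with h0 | h0
          · rw [h0] at hj4; exact absurd hj4 not_has4_zero
          · omega
        have hdjpos : 1 ≤ dj := by omega
        have hdig4 : (N - i) / 10 ^ (dj - 1) % 10 = 4 := hdjdig (by omega)
        rw [getNewJ_eq (N - i) dj hjpos hdjpos]
        simp only []
        set r := (N - i) % 10 ^ (dj - 1) with hr
        have hrle : r ≤ N - i := Nat.mod_le _ _
        set m' := i + r + 1 with hm'
        have hcast2 : (N : Int) - (((N - i - r : Nat) : Int) - 1) = ((m' : Nat) : Int) := by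
          have h5 : N - i - r ≤ N := by omega
          omega
        have hbadrange : ∀ m : Nat, i ≤ m → m < m' → ¬ goodPair N m := by
          intro m hm1 hm2 hgp
          have hjm1 : N - i - r ≤ N - m := by omega
          have hjm2 : N - m ≤ N - i := by omega
          have := jump_j_bad (N - i) (N - m) (dj - 1) hdig4 (by omega) hjm2
          exact hgp.2.2.2 ((has4_iff (N - m)).2 ⟨dj - 1, this⟩)
        have hms : m' ≤ s := by
          by_contra hc
          exact hbadrange s h2 (by omega) hs
        rw [hcast2]
        exact ih m' (by omega) hms (by omega)
    · rw [if_neg (by exact_mod_cast hdiz)]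
      have hdipos : 1 ≤ di := by omega
      have hdig4 : i / 10 ^ (di - 1) % 10 = 4 := hdig (by omega)
      rw [getNewI_eq i di h1 hdipos]
      simp only []
      set m' := i - i % 10 ^ di + 5 * 10 ^ (di - 1) with hm'
      have hpowfix : di - 1 + 1 = di := by omega
      have hprog : i < m' := by
        have := jump_i_progress i (di - 1) hdig4
        rw [hpowfix] at this
        exact this
      have hbadrange : ∀ m : Nat, i ≤ m → m < m' → ¬ goodPair N m := by
        intro m hm1 hm2 hgp
        have := jump_i_bad i m (di - 1) hdig4 hm1 (by rw [hpowfix]; omega)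
        exact hgp.2.2.1 ((has4_iff m).2 ⟨di - 1, this⟩)
      have hms : m' ≤ s := by
        by_contra hc
        exact hbadrange s h2 (by omega) hs
      exact ih m' (by omega) hms (by omega)

-- ===== VERDICT (by name: the statement is the Claim_ definition above) =====
theorem solve_spec : Claim_equal_solve := by
  intro n _ hpre
  unfold Spec_solve solve solve_alt
  have hn : (0:Int) ≤ n := by unfold Pre_solve at hpre; omega
  obtain ⟨N, rfl⟩ : ∃ N : Nat, n = (N : Nat) := ⟨n.toNat, by omega⟩
  have hN : 1 ≤ N := by unfold Pre_solve at hpre; exact_mod_cast hpre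
  obtain ⟨e, he⟩ := exists_goodPair N hN
  have hmin : ∀ m, m < Nat.find ⟨e, he⟩ → ¬ goodPair N m := fun m hm => Nat.find_min _ hm
  set s := Nat.find (⟨e, he⟩ : ∃ i, goodPair N i) with hsdef
  have hgs : goodPair N s := Nat.find_spec _
  have hs1 : 1 ≤ s := hgs.1
  have hsN : s ≤ N := hgs.2.1
  rw [show ((N : Int).toNat) = N by omega, show ((N : Int).natAbs) = N by omega]
  rw [show (1 : Int) = ((1 : Nat) : Int) by norm_num]
  rw [solveGo_run N s hgs hmin (N + 1) 1 le_rfl hs1 (by omega),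
      solveAltGo_run N s hgs hmin (N * 4 + 10) 1 le_rfl hs1 (by omega)]
  rfl
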